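-- pv_equiv track=rewrite | github.com/jaclew/celline_timelines | functions.py | filterArr
-- ===== SOURCE A (Python) =====
-- def filterArr(input_arr,input_val,treatment):
--     """ Idea of function:
--         1. Take in an array.
--         2. Take in treatment
--             cutoff = cut all values above VAL
--             threshold = cut all values below VAL
--             cap = cap all values above VAL to VAL
--             raise = raise all values below VAL to VAL
--     """
--
--     tmp_arr = []
--     for val in input_arr:
--         if treatment == 'cutoff' and val > input_val: continue
--         elif treatment == 'threshold' and val < input_val: continue
--         elif treatment == 'cap':
--             if val > input_val: val = input_val
--         elif treatment == 'raise':
--             if val < input_val: val = input_val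
--
--         tmp_arr.append(val)
--
--     return tmp_arr
-- ===== SOURCE B (Python) =====
-- def filterArr(input_arr, input_val, treatment):
--     # Table-driven, staged pipeline: normalize the treatment into a rule
--     # (action, sign) once, then run one uniform map stage (clamping) and one
--     # uniform filter stage (dropping), with a single arithmetic test
--     # sign*(v - input_val) > 0 replacing the four per-mode comparisons.
--     RULES = {'cutoff': ('drop', 1), 'threshold': ('drop', -1),
--              'cap': ('clamp', 1), 'raise': ('clamp', -1)}
--     action, sign = RULES.get(treatment, (None, 0))
--     clamped = [input_val if (action == 'clamp' and sign * (v - input_val) > 0) else v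
--                for v in input_arr]
--     return [v for v in clamped if not (action == 'drop' and sign * (v - input_val) > 0)]
-- ===== Notes on version B (the rewrite author's own statement) =====
-- stated objective: alternative
-- what changed: Replaces A's single fused loop with four string-comparison branches per element by a rule table normalizing the treatment to an (action, sign) pair once, then a staged map (clamp) pass followed by a filter (drop) pass whose single test is the arithmetic condition sign*(v - input_val) > 0.
import Mathlib
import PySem

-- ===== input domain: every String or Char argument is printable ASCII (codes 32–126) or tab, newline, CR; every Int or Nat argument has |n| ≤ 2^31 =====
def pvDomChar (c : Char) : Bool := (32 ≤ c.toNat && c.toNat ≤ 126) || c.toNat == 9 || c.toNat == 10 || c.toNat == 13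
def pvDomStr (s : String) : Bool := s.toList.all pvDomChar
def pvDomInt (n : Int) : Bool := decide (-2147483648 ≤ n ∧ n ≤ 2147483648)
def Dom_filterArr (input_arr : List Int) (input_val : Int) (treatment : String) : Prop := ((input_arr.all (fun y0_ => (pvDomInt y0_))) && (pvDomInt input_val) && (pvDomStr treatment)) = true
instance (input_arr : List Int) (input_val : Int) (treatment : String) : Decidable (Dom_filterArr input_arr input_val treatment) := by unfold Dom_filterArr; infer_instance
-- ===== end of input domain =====

-- B replaces A's single fused loop (four string-comparison branches per element) by a rule
-- table normalizing the treatment to an (action, sign) pair once, then a staged map (clamp)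
-- pass followed by a filter (drop) pass with the single test sign*(v-input_val) > 0;
-- objective: alternative (equal cost; not claimed faster).


-- ===== PORT A =====
def filterArr (input_arr : List Int) (input_val : Int) (treatment : String) : List Int :=
  input_arr.foldl (fun tmp_arr val =>
    if treatment == "cutoff" && val > input_val then tmp_arr
    else if treatment == "threshold" && val < input_val then tmp_arr
    else if treatment == "cap" then
      tmp_arr ++ [if val > input_val then input_val else val]
    else if treatment == "raise" then
      tmp_arr ++ [if val < input_val then input_val else val]
    else tmp_arr ++ [val]) []

-- ===== PORT B =====
def filterArr_alt (input_arr : List Int) (input_val : Int) (treatment : String) : List Int :=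
  let rules : PySem.Dict String (Option String × Int) :=
    PySem.Dict.ofList [("cutoff", (some "drop", 1)), ("threshold", (some "drop", -1)),
                       ("cap", (some "clamp", 1)), ("raise", (some "clamp", -1))]
  let p := rules.getD treatment (none, 0)
  let action := p.1
  let sign := p.2
  let clamped := input_arr.map (fun v =>
    if action == some "clamp" && decide (sign * (v - input_val) > 0) then input_val else v)
  clamped.filter (fun v => !(action == some "drop" && decide (sign * (v - input_val) > 0)))

-- ===== PRECONDITION & SPEC =====
def Spec_filterArr (input_arr : List Int) (input_val : Int) (treatment : String) (out : List Int) : Prop := out = filterArr_alt input_arr input_val treatment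
instance (input_arr : List Int) (input_val : Int) (treatment : String) (out : List Int) : Decidable (Spec_filterArr input_arr input_val treatment out) := by unfold Spec_filterArr; infer_instance

-- ===== CLAIM =====
def Claim_equal_filterArr : Prop := ∀ (input_arr : List Int) (input_val : Int) (treatment : String), Dom_filterArr input_arr input_val treatment → Spec_filterArr input_arr input_val treatment (filterArr input_arr input_val treatment)

-- ===== LEMMAS AND PROOFS =====

-- A per-treatment simple description of B used only inside the proofs.
def altSimple (input_arr : List Int) (input_val : Int) (treatment : String) : List Int :=
  if treatment == "cutoff" then input_arr.filter (fun v => !(v > input_val))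
  else if treatment == "threshold" then input_arr.filter (fun v => !(v < input_val))
  else if treatment == "cap" then input_arr.map (fun v => if v > input_val then input_val else v)
  else if treatment == "raise" then input_arr.map (fun v => if v < input_val then input_val else v)
  else input_arr

lemma alt_eq_simple (input_arr : List Int) (input_val : Int) (treatment : String) :
    filterArr_alt input_arr input_val treatment = altSimple input_arr input_val treatment := by
  by_cases h1 : treatment = "cutoff"
  · subst h1
    have hp : ((PySem.Dict.ofList [("cutoff", (some "drop", (1:Int))), ("threshold", (some "drop", -1)), ("cap", (some "clamp", 1)), ("raise", (some "clamp", -1))]).getD "cutoff" (none, 0)) = (some "drop", 1) := by decide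
    simp [filterArr_alt, altSimple, hp, sub_pos]
  · by_cases h2 : treatment = "threshold"
    · subst h2
      have hp : ((PySem.Dict.ofList [("cutoff", (some "drop", (1:Int))), ("threshold", (some "drop", -1)), ("cap", (some "clamp", 1)), ("raise", (some "clamp", -1))]).getD "threshold" (none, 0)) = (some "drop", -1) := by decide
      simp [filterArr_alt, altSimple, hp, h1]
    · by_cases h3 : treatment = "cap"
      · subst h3
        have hp : ((PySem.Dict.ofList [("cutoff", (some "drop", (1:Int))), ("threshold", (some "drop", -1)), ("cap", (some "clamp", 1)), ("raise", (some "clamp", -1))]).getD "cap" (none, 0)) = (some "clamp", 1) := by decide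
        simp [filterArr_alt, altSimple, hp, h1, h2, sub_pos]
      · by_cases h4 : treatment = "raise"
        · subst h4
          have hp : ((PySem.Dict.ofList [("cutoff", (some "drop", (1:Int))), ("threshold", (some "drop", -1)), ("cap", (some "clamp", 1)), ("raise", (some "clamp", -1))]).getD "raise" (none, 0)) = (some "clamp", -1) := by decide
          simp [filterArr_alt, altSimple, hp, h1, h2, h3]
        · have hp : ((PySem.Dict.ofList [("cutoff", (some "drop", (1:Int))), ("threshold", (some "drop", -1)), ("cap", (some "clamp", 1)), ("raise", (some "clamp", -1))]).getD treatment (none, 0)) = (none, 0) := by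
            simp [PySem.Dict.ofList, PySem.Dict.update, PySem.Dict.getD_insert, h1, h2, h3, h4]
          simp [filterArr_alt, altSimple, hp, h1, h2, h3, h4]

lemma filterArr_foldl_acc (input_arr : List Int) (input_val : Int) (treatment : String)
    (acc : List Int) :
    input_arr.foldl (fun tmp_arr val =>
      if treatment == "cutoff" && val > input_val then tmp_arr
      else if treatment == "threshold" && val < input_val then tmp_arr
      else if treatment == "cap" then
        tmp_arr ++ [if val > input_val then input_val else val]
      else if treatment == "raise" then
        tmp_arr ++ [if val < input_val then input_val else val]
      else tmp_arr ++ [val]) acc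
    = acc ++ altSimple input_arr input_val treatment := by
  by_cases h1 : treatment = "cutoff"
  · subst h1
    induction input_arr generalizing acc with
    | nil => simp [altSimple]
    | cons v rest ih =>
      simp only [List.foldl]
      by_cases hv : v > input_val <;>
        simp [altSimple, hv, List.filter] at * <;> simp [ih]
  · by_cases h2 : treatment = "threshold"
    · subst h2
      induction input_arr generalizing acc with
      | nil => simp [altSimple]
      | cons v rest ih =>
        simp only [List.foldl]
        by_cases hv : v < input_val <;>
          simp [altSimple, hv, List.filter] at * <;> simp [ih]
    · by_cases h3 : treatment = "cap"
      · subst h3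
        induction input_arr generalizing acc with
        | nil => simp [altSimple]
        | cons v rest ih =>
          simp only [List.foldl]
          rw [ih]
          simp [altSimple]
      · by_cases h4 : treatment = "raise"
        · subst h4
          induction input_arr generalizing acc with
          | nil => simp [altSimple]
          | cons v rest ih =>
            simp only [List.foldl]
            rw [ih]
            simp [altSimple]
        · induction input_arr generalizing acc with
          | nil => simp [altSimple, h1, h2, h3, h4]
          | cons v rest ih =>
            simp only [List.foldl]
            rw [ih]
            simp [altSimple, h1, h2, h3, h4]

-- ===== VERDICT =====
theorem filterArr_spec : Claim_equal_filterArr := by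
  intro input_arr input_val treatment _
  unfold Spec_filterArr filterArr
  rw [alt_eq_simple]
  simpa using filterArr_foldl_acc input_arr input_val treatment []
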